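-- pv_equiv track=rewrite | github.com/Vineeth0102/Accenture | This Year/Aug 14,2024/pro1.py | playlist
-- ===== SOURCE A (Python) =====
-- def playlist(String : str , k : int)->int:
--     i,j,max_val = 0,0,0
--     while j <=len(String):
--         if j-i >= k:
--             max_val = max(String[i:j].count('a'),max_val)
--             i+=1
--         j+=1
--     return max_val
-- ===== SOURCE B (Python) =====
-- def playlist(String: str, k: int) -> int:
--     n = len(String)
--     if k < 1 or k > n:
--         return 0
--     cur = String[:k].count('a')
--     best = cur
--     for j in range(k, n):
--         cur += (1 if String[j] == 'a' else 0) - (1 if String[j - k] == 'a' else 0)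
--         if cur > best:
--             best = cur
--     return best
-- ===== Notes on version B (the rewrite author's own statement) =====
-- stated objective: faster
-- what changed: Replaced recounting each k-window from scratch with a sliding window that updates the 'a' count incrementally as the window moves.
import Mathlib
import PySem

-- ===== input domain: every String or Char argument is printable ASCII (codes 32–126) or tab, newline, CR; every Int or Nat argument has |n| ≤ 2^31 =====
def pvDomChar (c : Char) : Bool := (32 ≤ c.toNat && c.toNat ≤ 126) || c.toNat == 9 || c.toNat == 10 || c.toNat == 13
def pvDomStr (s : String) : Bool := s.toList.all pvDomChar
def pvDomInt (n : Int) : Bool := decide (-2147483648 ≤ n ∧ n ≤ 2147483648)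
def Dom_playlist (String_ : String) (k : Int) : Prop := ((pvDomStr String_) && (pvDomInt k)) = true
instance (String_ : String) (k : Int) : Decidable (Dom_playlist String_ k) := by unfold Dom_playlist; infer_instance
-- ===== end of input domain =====

-- B replaces A's per-window recount by a single sliding pass that updates the 'a'-count
-- incrementally; return values are proved identical on all inputs.

-- ===== PORT A =====
-- A's while loop: j runs 0..len(String) inclusive and is always incremented, so the loop
-- is the fold of its body over range(0, len+1); state = (i, max_val).
def playlistStepA (s : List Char) (k : Int) (st : Int × Int) (j : Int) : Int × Int :=
  if j - st.1 ≥ k then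
    (st.1 + 1, max ((PySem.Chars.count (PySem.List.slice s (some st.1) (some j)) ['a'] : Int)) st.2)
  else st

def playlist (String_ : String) (k : Int) : Int :=
  ((PySem.List.pyRange 0 ((String_.toList.length : Int) + 1) 1).foldl
    (playlistStepA String_.toList k) (0, 0)).2

-- ===== PORT B =====
def playlistStepB (s : List Char) (k : Int) (st : Int × Int) (j : Int) : Int × Int :=
  let cur := st.1 + (if PySem.List.pyGet? s j = some 'a' then 1 else 0)
                  - (if PySem.List.pyGet? s (j - k) = some 'a' then 1 else 0)
  (cur, if cur > st.2 then cur else st.2)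

def playlist_alt (String_ : String) (k : Int) : Int :=
  let s := String_.toList
  let n : Int := (s.length : Int)
  if k < 1 ∨ n < k then 0
  else
    let cur0 : Int := (PySem.Chars.count (PySem.List.slice s none (some k)) ['a'] : Int)
    ((PySem.List.pyRange k n 1).foldl (playlistStepB s k) (cur0, cur0)).2

-- ===== PRECONDITION & SPEC =====
def Spec_playlist (String_ : String) (k : Int) (out : Int) : Prop := out = playlist_alt String_ k
instance (String_ : String) (k : Int) (out : Int) : Decidable (Spec_playlist String_ k out) := by unfold Spec_playlist; infer_instance

-- ===== CLAIM (what is proved, stated in full; the proofs are below) =====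
def Claim_equal_playlist : Prop := ∀ (String_ : String) (k : Int), Dom_playlist String_ k → Spec_playlist String_ k (playlist String_ k)

-- ===== LEMMAS AND PROOFS =====

-- count of 'a' in the length-K window of s starting at position t
def pvWinCnt (s : List Char) (K t : Nat) : Int := (((s.drop t).take K).count 'a' : Int)

-- running maximum of pvWinCnt over start positions 0..m
def pvM (s : List Char) (K : Nat) : Nat → Int
  | 0 => pvWinCnt s K 0
  | m + 1 => max (pvM s K m) (pvWinCnt s K (m + 1))

theorem pv_count_go_singleton (fuel : Nat) : ∀ (l : List Char) (acc : Nat),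
    l.length ≤ fuel → PySem.Chars.count.go ['a'] fuel l acc = acc + l.count 'a' := by
  induction fuel with
  | zero =>
    intro l acc h
    have hl : l = [] := List.eq_nil_of_length_eq_zero (Nat.le_zero.mp h)
    subst hl
    simp [PySem.Chars.count.go]
  | succ n ih =>
    intro l acc h
    cases l with
    | nil => simp [PySem.Chars.count.go]
    | cons c t =>
      have ht : t.length ≤ n := by simpa using h
      by_cases hc : c = 'a'
      · subst hc
        simp only [PySem.Chars.count.go, List.isPrefixOf, beq_self_eq_true, Bool.true_and,
          List.length_cons, List.length_nil, List.drop_succ_cons, List.drop_zero]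
        rw [ih t (acc + 1) ht]
        simp
        omega
      · simp only [PySem.Chars.count.go, List.isPrefixOf]
        rw [if_neg (by simp only [Bool.and_eq_true, beq_iff_eq]; rintro ⟨hh, -⟩; exact hc hh.symm)]
        rw [ih t acc ht]
        simp [hc]

theorem pv_count_singleton (l : List Char) : (PySem.Chars.count l ['a'] : Int) = (l.count 'a' : Int) := by
  have h : PySem.Chars.count l ['a'] = l.count 'a' := by
    simp only [PySem.Chars.count, List.isEmpty_cons, if_false, Bool.false_eq_true]
    simpa using pv_count_go_singleton l.length l 0 le_rfl
  exact_mod_cast h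

theorem pv_shift (s : List Char) (K t : Nat) (h : t + K < s.length) :
    pvWinCnt s K (t + 1) =
      pvWinCnt s K t + (if s[t + K]? = some 'a' then 1 else 0)
                     - (if s[t]? = some 'a' then 1 else 0) := by
  have ht : t < s.length := by omega
  have e1 : (s.drop t).take (K + 1) = (s.drop t).take K ++ [s[t + K]] := by
    rw [List.take_add_one, List.getElem?_drop, List.getElem?_eq_getElem h]
    rfl
  have e2 : (s.drop t).take (K + 1) = s[t] :: (s.drop (t + 1)).take K := by
    rw [List.drop_eq_getElem_cons ht, List.take_succ_cons]
  have hx : ∀ x : Char, (([x] : List Char).count 'a') = if x = 'a' then 1 else 0 := by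
    intro x; by_cases hh : x = 'a' <;> simp [hh]
  have c1 : (((s.drop t).take (K + 1)).count 'a')
      = ((s.drop t).take K).count 'a' + (if s[t + K] = 'a' then 1 else 0) := by
    rw [e1, List.count_append, hx]
  have c2 : (((s.drop t).take (K + 1)).count 'a')
      = (if s[t] = 'a' then 1 else 0) + ((s.drop (t + 1)).take K).count 'a' := by
    rw [e2, show s[t] :: (s.drop (t + 1)).take K = [s[t]] ++ (s.drop (t + 1)).take K from rfl,
      List.count_append, hx]
  have g1 : (s[t + K]? = some 'a') ↔ s[t + K] = 'a' := by
    rw [List.getElem?_eq_getElem h]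
    exact ⟨fun hh => Option.some.inj hh, fun hh => by rw [hh]⟩
  have g2 : (s[t]? = some 'a') ↔ s[t] = 'a' := by
    rw [List.getElem?_eq_getElem ht]
    exact ⟨fun hh => Option.some.inj hh, fun hh => by rw [hh]⟩
  unfold pvWinCnt
  simp only [g1, g2]
  by_cases h1 : s[t + K] = 'a' <;> by_cases h2 : s[t] = 'a'
  · rw [if_pos h1] at c1; rw [if_pos h2] at c2; rw [if_pos h1, if_pos h2]; omega
  · rw [if_pos h1] at c1; rw [if_neg h2] at c2; rw [if_pos h1, if_neg h2]; omega
  · rw [if_neg h1] at c1; rw [if_pos h2] at c2; rw [if_neg h1, if_pos h2]; omega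
  · rw [if_neg h1] at c1; rw [if_neg h2] at c2; rw [if_neg h1, if_neg h2]; omega

-- A's loop invariant for 1 ≤ K
theorem pv_invA (s : List Char) (K : Nat) (hK : 1 ≤ K) : ∀ m : Nat,
    (PySem.List.pyRange 0 (m : Int) 1).foldl (playlistStepA s (K : Int)) (0, 0)
      = if m ≤ K then (0, 0) else (((m : Int) - (K : Int)), pvM s K (m - K - 1)) := by
  intro m
  induction m with
  | zero =>
    rw [if_pos (Nat.zero_le K)]
    simp [PySem.List.pyRange_one_eq_nil]
  | succ m ih =>
    have hcast : ((m + 1 : Nat) : Int) = (m : Int) + 1 := by push_cast; ring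
    rw [hcast, PySem.List.pyRange_one_succ_right (by positivity), List.foldl_append, ih]
    simp only [List.foldl_cons, List.foldl_nil]
    by_cases h1 : m + 1 ≤ K
    · rw [if_pos (by omega : m ≤ K), if_pos h1]
      unfold playlistStepA
      rw [if_neg (by push_cast; omega)]
    · by_cases h2 : m = K
      · subst h2
        rw [if_pos le_rfl, if_neg h1]
        unfold playlistStepA
        rw [if_pos (by simp)]
        have hsl : PySem.List.slice s (some (0 : Int)) (some ((m : Nat) : Int)) = (s.drop 0).take (m - 0) := by
          exact_mod_cast PySem.List.slice_natCast s 0 m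
        rw [hsl]
        simp only [Nat.sub_zero, List.drop_zero, Prod.mk.injEq]
        constructor
        · omega
        · rw [pv_count_singleton]
          have : pvM s m (m + 1 - m - 1) = pvWinCnt s m 0 := by
            rw [show m + 1 - m - 1 = 0 from by omega]
            rfl
          rw [this]
          unfold pvWinCnt
          simp only [List.drop_zero]
          exact max_eq_left (Int.natCast_nonneg _)
      · have h3 : K < m := by omega
        rw [if_neg (by omega : ¬ m ≤ K), if_neg h1]
        unfold playlistStepA
        dsimp only
        rw [if_pos (by omega)]
        simp only [Prod.mk.injEq]
        constructor
        · omega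
        · have hc1 : (m : Int) - (K : Int) = ((m - K : Nat) : Int) := by omega
          rw [hc1]
          have hsl : PySem.List.slice s (some ((m - K : Nat) : Int)) (some ((m : Nat) : Int))
              = (s.drop (m - K)).take (m - (m - K)) :=
            PySem.List.slice_natCast s (m - K) m
          rw [hsl, show m - (m - K) = K from by omega, pv_count_singleton]
          have hM : pvM s K (m - K) = max (pvM s K (m - K - 1)) (pvWinCnt s K (m - K)) := by
            rw [show m - K = (m - K - 1) + 1 from by omega]
            rfl
          rw [show m + 1 - K - 1 = m - K from by omega, hM, max_comm]
          rfl

-- A's loop when k ≤ 0: every window considered is empty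
theorem pv_invA_nonpos (s : List Char) (k : Int) (hk : k ≤ 0) : ∀ m : Nat,
    (PySem.List.pyRange 0 (m : Int) 1).foldl (playlistStepA s k) (0, 0) = ((m : Int), 0) := by
  intro m
  induction m with
  | zero => simp [PySem.List.pyRange_one_eq_nil]
  | succ m ih =>
    have hcast : ((m + 1 : Nat) : Int) = (m : Int) + 1 := by push_cast; ring
    rw [hcast, PySem.List.pyRange_one_succ_right (by positivity), List.foldl_append, ih]
    simp only [List.foldl_cons, List.foldl_nil]
    unfold playlistStepA
    rw [if_pos (by omega)]
    have hsl : PySem.List.slice s (some ((m : Nat) : Int)) (some ((m : Nat) : Int))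
        = (s.drop m).take (m - m) := PySem.List.slice_natCast s m m
    rw [hsl]
    simp

-- A's loop when k > len(s): the branch never fires
theorem pv_invA_big (s : List Char) (k : Int) (hk : (s.length : Int) < k) : ∀ m : Nat,
    m ≤ s.length + 1 →
    (PySem.List.pyRange 0 (m : Int) 1).foldl (playlistStepA s k) (0, 0) = (0, 0) := by
  intro m
  induction m with
  | zero => intro _; simp [PySem.List.pyRange_one_eq_nil]
  | succ m ih =>
    intro hm
    have hcast : ((m + 1 : Nat) : Int) = (m : Int) + 1 := by push_cast; ring
    rw [hcast, PySem.List.pyRange_one_succ_right (by positivity), List.foldl_append,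
      ih (by omega)]
    simp only [List.foldl_cons, List.foldl_nil]
    unfold playlistStepA
    rw [if_neg (by push_cast at hk ⊢; omega)]

-- B's loop invariant
theorem pv_invB (s : List Char) (K : Nat) (hKN : K ≤ s.length) : ∀ m : Nat,
    m ≤ s.length - K →
    (PySem.List.pyRange (K : Int) ((K + m : Nat) : Int) 1).foldl (playlistStepB s (K : Int))
        (pvWinCnt s K 0, pvWinCnt s K 0)
      = (pvWinCnt s K m, pvM s K m) := by
  intro m
  induction m with
  | zero =>
    intro _
    rw [show ((K + 0 : Nat) : Int) = (K : Int) from by push_cast; ring,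
      PySem.List.pyRange_one_eq_nil le_rfl]
    rfl
  | succ m ih =>
    intro hm
    have hcast : ((K + (m + 1) : Nat) : Int) = ((K + m : Nat) : Int) + 1 := by push_cast; ring
    rw [hcast, PySem.List.pyRange_one_succ_right (by push_cast; omega), List.foldl_append,
      ih (by omega)]
    simp only [List.foldl_cons, List.foldl_nil]
    unfold playlistStepB
    dsimp only
    have hidx : ((K + m : Nat) : Int) - (K : Int) = ((m : Nat) : Int) := by push_cast; ring
    rw [hidx, PySem.List.pyGet?_natCast, PySem.List.pyGet?_natCast]
    have hlt : m + K < s.length := by omega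
    have hshift := pv_shift s K m hlt
    rw [show K + m = m + K from by omega, ← hshift]
    simp only [Prod.mk.injEq]
    refine ⟨trivial, ?_⟩
    have hM : pvM s K (m + 1) = max (pvM s K m) (pvWinCnt s K (m + 1)) := rfl
    rw [hM]
    by_cases hle : pvWinCnt s K (m + 1) ≤ pvM s K m
    · rw [if_neg (by omega), max_eq_left hle]
    · rw [if_pos (by omega), max_eq_right (by omega : pvM s K m ≤ pvWinCnt s K (m + 1))]

-- ===== VERDICT (by name: the statement is the Claim_ definition above) =====
theorem playlist_spec : Claim_equal_playlist := by
  intro String_ k _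
  unfold Spec_playlist playlist playlist_alt
  by_cases hk0 : k < 1
  · rw [if_pos (Or.inl hk0)]
    have hlen : ((String_.toList.length : Int) + 1) = ((String_.toList.length + 1 : Nat) : Int) := by
      push_cast; ring
    rw [hlen, pv_invA_nonpos String_.toList k (by omega) (String_.toList.length + 1)]
  · by_cases hkbig : (String_.toList.length : Int) < k
    · rw [if_pos (Or.inr hkbig)]
      have hlen : ((String_.toList.length : Int) + 1) = ((String_.toList.length + 1 : Nat) : Int) := by
        push_cast; ring
      rw [hlen, pv_invA_big String_.toList k hkbig (String_.toList.length + 1) le_rfl]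
    · rw [if_neg (by rintro (h | h) <;> omega)]
      set s := String_.toList with hs
      have hk1 : 1 ≤ k := by omega
      have hkn : k ≤ (s.length : Int) := by omega
      set K := k.toNat with hKdef
      have hkK : k = (K : Int) := by omega
      have hKN : K ≤ s.length := by omega
      rw [hkK]
      -- A side
      have hlen : ((s.length : Int) + 1) = ((s.length + 1 : Nat) : Int) := by push_cast; ring
      rw [hlen, pv_invA s K (by omega) (s.length + 1),
        if_neg (by omega : ¬ s.length + 1 ≤ K)]
      -- B side
      have hcur0 : (PySem.Chars.count (PySem.List.slice s none (some (K : Int))) ['a'] : Int)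
          = pvWinCnt s K 0 := by
        rw [PySem.List.slice_to_natCast, pv_count_singleton]
        unfold pvWinCnt
        rw [List.drop_zero]
      rw [hcur0]
      rw [show ((s.length : Int)) = ((K + (s.length - K) : Nat) : Int) from by push_cast; omega]
      dsimp only
      rw [pv_invB s K hKN (s.length - K) le_rfl]
      rw [show s.length + 1 - K - 1 = s.length - K from by omega]
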